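-- pv_equiv track=rewrite | github.com/flily/projeuler.py | problems/p0051.py | get_number_families
-- ===== SOURCE A (Python) =====
-- from typing import Iterable, Iterator
--
-- def get_number_families(n: int) -> Iterable[str]:
--     """
--     Get the number families of n.
--     """
--     set_digit = set()
--     result = set()
--     s = str(n)
--     for digit in s:
--         if digit in set_digit:
--             continue
--
--         set_digit.add(digit)
--         result.add(s.replace(digit, '*'))
--
--     return result
-- ===== SOURCE B (Python) =====
-- def get_number_families(n):
--     """
--     Get the number families of n.
--
--     Online single pass: all masks are grown in parallel.  A dict maps each
--     character seen so far to its partially built mask; at each new character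
--     every partial mask is extended by one character ('*' for its own key,
--     the character itself otherwise), and a newly seen character starts its
--     mask from the prefix processed so far.  No per-digit rescans of s.
--     """
--     s = str(n)
--     masks = {}          # char -> partial mask as list of chars
--     prefix = []
--     for ch in s:
--         if ch not in masks:
--             masks[ch] = prefix.copy()
--         for k in masks:
--             masks[k].append('*' if ch == k else ch)
--         prefix.append(ch)
--     return {''.join(m) for m in masks.values()}
-- ===== Notes on version B (the rewrite author's own statement) =====
-- stated objective: alternative
-- what changed: B makes a single online pass over str(n) growing ALL masks in parallel (a dict char->partial mask plus a running prefix, each step appending one character to every partial mask), instead of A's loop that calls str.replace to rescan the whole string once per distinct digit.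
import Mathlib
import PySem

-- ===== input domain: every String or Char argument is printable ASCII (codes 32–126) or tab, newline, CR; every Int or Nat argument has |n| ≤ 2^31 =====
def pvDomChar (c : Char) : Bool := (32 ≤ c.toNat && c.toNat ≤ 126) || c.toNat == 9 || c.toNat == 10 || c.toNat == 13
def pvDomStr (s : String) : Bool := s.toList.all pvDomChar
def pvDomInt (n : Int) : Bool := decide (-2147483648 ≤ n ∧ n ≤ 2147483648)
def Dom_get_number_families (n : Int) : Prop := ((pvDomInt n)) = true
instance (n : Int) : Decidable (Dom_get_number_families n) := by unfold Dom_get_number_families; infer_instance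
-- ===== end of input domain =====

-- B replaces A's per-distinct-digit str.replace rescans by ONE online pass that grows all
-- masks in parallel (dict char → partial mask, plus the running prefix); same cost class.

-- ===== PORT A =====
def get_number_families (n : Int) : List String :=
  let s := PySem.Int.toStr n
  (List.foldl
    (fun (st : PySem.Set Char × PySem.Set String) (digit : Char) =>
      if PySem.Set.contains st.1 digit then st
      else (PySem.Set.add st.1 digit,
            PySem.Set.add st.2 (PySem.Str.replace s (String.ofList [digit]) "*")))
    (PySem.Set.empty, PySem.Set.empty) s.toList).2

-- ===== PORT B =====
-- loop body of Source B: masks.setdefault-style insert of the prefix for a new char, then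
-- append one character to EVERY partial mask, then extend the prefix
def pvBStep (st : PySem.Dict Char (List Char) × List Char) (ch : Char) :
    PySem.Dict Char (List Char) × List Char :=
  let d := if st.1.contains ch then st.1 else st.1.insert ch st.2
  let d2 := PySem.Dict.mk
    (d.items.map (fun kv => (kv.1, kv.2 ++ [if ch == kv.1 then '*' else ch])))
  (d2, st.2 ++ [ch])

def get_number_families_alt (n : Int) : List String :=
  let s := (PySem.Int.toStr n).toList
  let masks := (List.foldl pvBStep (PySem.Dict.empty, []) s).1
  List.foldl (fun r m => PySem.Set.add r (String.ofList m)) PySem.Set.empty masks.values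

-- ===== PRECONDITION & SPEC =====
def Spec_get_number_families (n : Int) (out : List String) : Prop := out = get_number_families_alt n
instance (n : Int) (out : List String) : Decidable (Spec_get_number_families n out) := by unfold Spec_get_number_families; infer_instance

-- ===== CLAIM (what is proved, stated in full; the proofs are below) =====
def Claim_equal_get_number_families : Prop := ∀ (n : Int), Dom_get_number_families n → Spec_get_number_families n (get_number_families n)

-- ===== LEMMAS AND PROOFS =====

-- the mask of digit c in s: every occurrence of c replaced by '*'
def pvMask (c : Char) (s : List Char) : List Char :=
  s.map (fun ch => if ch = c then '*' else ch)

-- first occurrences of l not already in seen, in order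
def pvDdl (seen : PySem.Set Char) : List Char → List Char
  | [] => []
  | c :: t => if PySem.Set.contains seen c then pvDdl seen t
              else c :: pvDdl (PySem.Set.add seen c) t

-- ---- replace with a single-char needle is a map ----
theorem pvGo_single (d : Char) : ∀ (fuel : Nat) (l : List Char) (acc : List Char),
    l.length ≤ fuel →
    PySem.Chars.replace.go [d] ['*'] fuel l acc = acc.reverse ++ pvMask d l := by
  intro fuel
  induction fuel with
  | zero =>
      intro l acc h
      have : l = [] := List.eq_nil_of_length_eq_zero (Nat.le_zero.mp h)
      subst this
      simp [PySem.Chars.replace.go, pvMask]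
  | succ m ih =>
      intro l acc h
      cases l with
      | nil => simp [PySem.Chars.replace.go, pvMask]
      | cons c t =>
          rw [PySem.Chars.replace.go]
          have hpre : List.isPrefixOf [d] (c :: t) = (d == c) := by
            simp [List.isPrefixOf]
          by_cases hdc : d = c
          · subst hdc
            simp only [hpre, beq_self_eq_true, if_pos]
            rw [show List.drop [d].length (d :: t) = t from rfl,
                show (['*'].reverse ++ acc) = '*' :: acc from rfl]
            rw [ih t ('*' :: acc) (by simpa using Nat.le_of_succ_le_succ h)]
            simp [pvMask]
          · simp only [hpre, beq_eq_false_iff_ne.mpr hdc, if_neg Bool.false_ne_true]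
            rw [ih t (c :: acc) (by simpa using Nat.le_of_succ_le_succ h)]
            simp [pvMask]
            intro hh
            exact absurd hh.symm hdc

theorem pvReplace_single (s : List Char) (d : Char) :
    PySem.Chars.replace s [d] ['*'] = pvMask d s := by
  rw [PySem.Chars.replace]
  simp only [List.isEmpty_cons, if_neg Bool.false_ne_true]
  simpa using pvGo_single d s.length s [] le_rfl

-- ---- A's loop adds exactly the masks of the first occurrences ----
theorem pvFoldA (f : Char → String) : ∀ (l : List Char) (seen : PySem.Set Char) (res : PySem.Set String),
    (List.foldl
      (fun (st : PySem.Set Char × PySem.Set String) (digit : Char) =>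
        if PySem.Set.contains st.1 digit then st
        else (PySem.Set.add st.1 digit, PySem.Set.add st.2 (f digit)))
      (seen, res) l).2
    = List.foldl (fun r d => PySem.Set.add r (f d)) res (pvDdl seen l) := by
  intro l
  induction l with
  | nil => intro seen res; simp [pvDdl]
  | cons c t ih =>
      intro seen res
      by_cases h : PySem.Set.contains seen c = true
      · have hd : pvDdl seen (c :: t) = pvDdl seen t := by rw [pvDdl, if_pos h]
        show (List.foldl
            (fun (st : PySem.Set Char × PySem.Set String) (digit : Char) =>
              if PySem.Set.contains st.1 digit then st
              else (PySem.Set.add st.1 digit, PySem.Set.add st.2 (f digit)))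
            (if PySem.Set.contains seen c then (seen, res)
             else (PySem.Set.add seen c, PySem.Set.add res (f c))) t).2
          = List.foldl (fun r d => PySem.Set.add r (f d)) res (pvDdl seen (c :: t))
        rw [if_pos h, hd]
        exact ih seen res
      · have hd : pvDdl seen (c :: t) = c :: pvDdl (PySem.Set.add seen c) t := by
          rw [pvDdl, if_neg h]
        show (List.foldl
            (fun (st : PySem.Set Char × PySem.Set String) (digit : Char) =>
              if PySem.Set.contains st.1 digit then st
              else (PySem.Set.add st.1 digit, PySem.Set.add st.2 (f digit)))
            (if PySem.Set.contains seen c then (seen, res)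
             else (PySem.Set.add seen c, PySem.Set.add res (f c))) t).2
          = List.foldl (fun r d => PySem.Set.add r (f d)) res (pvDdl seen (c :: t))
        rw [if_neg h, hd, List.foldl_cons]
        exact ih (PySem.Set.add seen c) (PySem.Set.add res (f c))

theorem pvUpdate_eq_ddl : ∀ (l : List Char) (seen : PySem.Set Char),
    PySem.Set.update seen l = seen ++ pvDdl seen l := by
  intro l
  induction l with
  | nil => intro seen; simp [PySem.Set.update, pvDdl]
  | cons c t ih =>
      intro seen
      have hstep : PySem.Set.update seen (c :: t) = PySem.Set.update (PySem.Set.add seen c) t := rfl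
      by_cases h : c ∈ seen
      · have hadd : PySem.Set.add seen c = seen := by simp [PySem.Set.add, h]
        have hd : pvDdl seen (c :: t) = pvDdl seen t := by simp [pvDdl, h]
        rw [hstep, hadd, hd, ih]
      · have hadd : PySem.Set.add seen c = seen ++ [c] := by simp [PySem.Set.add, h]
        have hd : pvDdl seen (c :: t) = c :: pvDdl (PySem.Set.add seen c) t := by
          simp [pvDdl, h]
        rw [hstep, hadd, hd, ih, hadd, List.append_assoc, List.singleton_append]

theorem pvOfList_eq_ddl (l : List Char) : PySem.Set.ofList l = pvDdl PySem.Set.empty l := by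
  have h := pvUpdate_eq_ddl l []
  rw [PySem.Set.update_nil_left] at h
  simpa [PySem.Set.empty] using h

-- ---- closed form of A ----
theorem pvA_closed (n : Int) :
    get_number_families n
      = List.foldl (fun r c => PySem.Set.add r (String.ofList (pvMask c (PySem.Int.toStr n).toList)))
          PySem.Set.empty (PySem.Set.ofList (PySem.Int.toStr n).toList) := by
  show (List.foldl
    (fun (st : PySem.Set Char × PySem.Set String) (digit : Char) =>
      if PySem.Set.contains st.1 digit then st
      else (PySem.Set.add st.1 digit,
            PySem.Set.add st.2 ((fun d => PySem.Str.replace (PySem.Int.toStr n) (String.ofList [d]) "*") digit)))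
    (PySem.Set.empty, PySem.Set.empty) (PySem.Int.toStr n).toList).2 = _
  rw [pvFoldA, pvOfList_eq_ddl]
  have hf : ∀ d : Char,
      PySem.Str.replace (PySem.Int.toStr n) (String.ofList [d]) "*"
        = String.ofList (pvMask d (PySem.Int.toStr n).toList) := by
    intro d
    rw [PySem.Str.replace]
    congr 1
    have h1 : (String.ofList [d]).toList = [d] := String.toList_ofList
    have h2 : "*".toList = ['*'] := by decide
    rw [h1, h2, pvReplace_single]
  simp only [hf]

-- ---- B's invariant: after processing prefix p, the dict holds (c, pvMask c p) for the
-- distinct chars of p in first-occurrence order, and the second component is p ----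
theorem pvMask_of_not_mem (c : Char) (p : List Char) (h : c ∉ p) : pvMask c p = p := by
  unfold pvMask
  conv_rhs => rw [← List.map_id p]
  apply List.map_congr_left
  intro x hx
  have hne : x ≠ c := fun he => h (he ▸ hx)
  simp [hne]

theorem pvMask_append_singleton (c ch : Char) (p : List Char) :
    pvMask c (p ++ [ch]) = pvMask c p ++ [if ch = c then '*' else ch] := by
  simp [pvMask]

theorem pvB_inv : ∀ (l p : List Char),
    List.foldl pvBStep
      (PySem.Dict.mk ((PySem.Set.ofList p).map (fun c => (c, pvMask c p))), p) l
    = (PySem.Dict.mk ((PySem.Set.ofList (p ++ l)).map (fun c => (c, pvMask c (p ++ l)))),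
       p ++ l) := by
  intro l
  induction l with
  | nil => intro p; simp
  | cons ch t ih =>
      intro p
      rw [List.foldl_cons]
      have hstep : pvBStep
          (PySem.Dict.mk ((PySem.Set.ofList p).map (fun c => (c, pvMask c p))), p) ch
          = (PySem.Dict.mk ((PySem.Set.ofList (p ++ [ch])).map
              (fun c => (c, pvMask c (p ++ [ch])))), p ++ [ch]) := by
        unfold pvBStep
        by_cases h : ch ∈ p
        · have hc : (PySem.Dict.mk ((PySem.Set.ofList p).map (fun c => (c, pvMask c p)))).contains ch = true := by
            rw [PySem.Dict.contains_iff_mem_keys]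
            simp only [PySem.Dict.keys, List.map_map]
            simp [Function.comp, PySem.Set.mem_ofList, h]
          simp only [hc, if_pos]
          simp only [Prod.mk.injEq]
          refine ⟨PySem.Dict.ext ?_, trivial⟩
          rw [PySem.Set.ofList_append_singleton,
              PySem.Set.add_of_mem (show ch ∈ PySem.Set.ofList p by simp [PySem.Set.mem_ofList, h])]
          show ((PySem.Set.ofList p).map (fun c => (c, pvMask c p))).map
              (fun kv => (kv.1, kv.2 ++ [if ch == kv.1 then '*' else ch]))
            = (PySem.Set.ofList p).map (fun c => (c, pvMask c (p ++ [ch])))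
          rw [List.map_map]
          apply List.map_congr_left
          intro c _
          simp [Function.comp, pvMask_append_singleton, beq_iff_eq]
        · have hc : (PySem.Dict.mk ((PySem.Set.ofList p).map (fun c => (c, pvMask c p)))).contains ch = false := by
            rw [Bool.eq_false_iff]
            intro hcc
            have hm := (PySem.Dict.contains_iff_mem_keys _ _).mp hcc
            simp only [PySem.Dict.keys, List.map_map] at hm
            exact h (by simpa [Function.comp, PySem.Set.mem_ofList] using hm)
          simp only [hc, Bool.false_eq_true, if_neg, not_false_iff]
          simp only [Prod.mk.injEq]
          refine ⟨PySem.Dict.ext ?_, trivial⟩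
          show ((PySem.Dict.mk ((PySem.Set.ofList p).map (fun c => (c, pvMask c p)))).insert ch p).items.map
              (fun kv => (kv.1, kv.2 ++ [if ch == kv.1 then '*' else ch]))
            = (PySem.Set.ofList (p ++ [ch])).map (fun c => (c, pvMask c (p ++ [ch])))
          rw [PySem.Dict.items_insert_of_not_contains _ _ hc]
          rw [PySem.Set.ofList_append_singleton,
              PySem.Set.add_of_not_mem (show ch ∉ PySem.Set.ofList p by simp [PySem.Set.mem_ofList, h])]
          show (((PySem.Set.ofList p).map (fun c => (c, pvMask c p))) ++ [(ch, p)]).map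
              (fun kv => (kv.1, kv.2 ++ [if ch == kv.1 then '*' else ch]))
            = ((PySem.Set.ofList p) ++ [ch]).map (fun c => (c, pvMask c (p ++ [ch])))
          rw [List.map_append, List.map_append, List.map_map]
          congr 1
          · apply List.map_congr_left
            intro c _
            simp [Function.comp, pvMask_append_singleton, beq_iff_eq]
          · simp [pvMask_append_singleton, pvMask_of_not_mem ch p h]
      rw [hstep, ih (p ++ [ch]), List.append_assoc]
      rfl

theorem pvB_closed (n : Int) :
    get_number_families_alt n
      = List.foldl (fun r c => PySem.Set.add r (String.ofList (pvMask c (PySem.Int.toStr n).toList)))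
          PySem.Set.empty (PySem.Set.ofList (PySem.Int.toStr n).toList) := by
  show List.foldl (fun r m => PySem.Set.add r (String.ofList m)) PySem.Set.empty
      ((List.foldl pvBStep (PySem.Dict.empty, []) (PySem.Int.toStr n).toList).1).values = _
  have h0 : (PySem.Dict.empty : PySem.Dict Char (List Char))
      = PySem.Dict.mk ((PySem.Set.ofList ([] : List Char)).map (fun c => (c, pvMask c []))) := rfl
  rw [h0, pvB_inv (PySem.Int.toStr n).toList []]
  show List.foldl (fun r m => PySem.Set.add r (String.ofList m)) PySem.Set.empty
      (((PySem.Set.ofList (PySem.Int.toStr n).toList).map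
          (fun c => (c, pvMask c (PySem.Int.toStr n).toList))).map Prod.snd) = _
  rw [List.map_map, List.foldl_map]
  rfl

-- ===== VERDICT (by name: the statement is the Claim_ definition above) =====
theorem get_number_families_spec : Claim_equal_get_number_families := by
  intro n _
  show get_number_families n = get_number_families_alt n
  rw [pvA_closed, pvB_closed]
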